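-- pv_equiv track=rewrite | github.com/ColdSauce/solvinga858 | solve.py | get_amount_chars_together
-- ===== SOURCE A (Python) =====
-- def is_number(c):
--     try:
--         int(c)
--         return True
--     except ValueError:
--         return False
--
-- def get_amount_chars_together(st):
--     total = 0
--     previous_was_char = False
--     for c in st:
--         if not is_number(c):
--             if not previous_was_char:
--                 total = total + 1
--             previous_was_char = True
--         else:
--             previous_was_char = False
--     return total
-- ===== SOURCE B (Python) =====
-- def is_number(c):
--     try:
--         int(c)
--         return True
--     except ValueError:
--         return False
--
-- def get_amount_chars_together(st):
--     # Each maximal run of k non-number chars contributes k chars and k-1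
--     # adjacent non-number pairs, so #runs = #non-number chars - #adjacent pairs.
--     flags = [not is_number(c) for c in st]
--     return sum(flags) - sum(1 for a, b in zip(flags, flags[1:]) if a and b)
-- ===== Notes on version B (the rewrite author's own statement) =====
-- stated objective: alternative
-- what changed: Replaces A's stateful flag-scan with an arithmetic identity: build the non-number flag list once, then compute #runs as (count of non-number chars) minus (count of adjacent non-number pairs) via two independent counts.
import Mathlib
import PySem

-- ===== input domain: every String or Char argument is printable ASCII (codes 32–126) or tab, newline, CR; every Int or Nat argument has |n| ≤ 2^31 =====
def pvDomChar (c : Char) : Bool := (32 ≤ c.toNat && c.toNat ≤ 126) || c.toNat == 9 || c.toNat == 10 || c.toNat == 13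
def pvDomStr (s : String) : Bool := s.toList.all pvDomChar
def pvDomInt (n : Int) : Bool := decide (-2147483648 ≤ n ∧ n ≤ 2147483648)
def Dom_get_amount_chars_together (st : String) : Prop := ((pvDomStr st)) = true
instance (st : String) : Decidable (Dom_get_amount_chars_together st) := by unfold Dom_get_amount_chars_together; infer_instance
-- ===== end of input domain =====

-- B replaces A's stateful flag-scan with the identity #runs = #non-number chars - #adjacent
-- non-number pairs, computed as two independent counts over a flag list: alternative, same cost.


-- ===== PORT A =====
-- is_number(c): int(c) succeeds (PySem.Int.ofChars? = Python int(str)); shared by both Pythons.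
def is_number (c : Char) : Bool := (PySem.Int.ofChars? [c]).isSome

-- the loop body of A (total/previous_was_char state)
def stepA (s : Int × Bool) (c : Char) : Int × Bool :=
  if !(is_number c) then
    (if !s.2 then s.1 + 1 else s.1, true)
  else
    (s.1, false)

def get_amount_chars_together (st : String) : Int :=
  (st.toList.foldl stepA (0, false)).1

-- ===== PORT B =====
-- flags = [not is_number(c) for c in st]
def bFlags (st : String) : List Bool := st.toList.map (fun c => !is_number c)

-- sum(flags): Python sums the booleans as 0/1
def cntT (fl : List Bool) : Int := (fl.countP id : Nat)

-- sum(1 for a, b in zip(flags, flags[1:]) if a and b)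
def adjT (fl : List Bool) : Int := ((fl.zip fl.tail).countP (fun p => p.1 && p.2) : Nat)

def get_amount_chars_together_alt (st : String) : Int :=
  cntT (bFlags st) - adjT (bFlags st)

-- ===== PRECONDITION & SPEC =====
def Spec_get_amount_chars_together (st : String) (out : Int) : Prop := out = get_amount_chars_together_alt st
instance (st : String) (out : Int) : Decidable (Spec_get_amount_chars_together st out) := by unfold Spec_get_amount_chars_together; infer_instance

-- ===== CLAIM (what is proved, stated in full; the proofs are below) =====
def Claim_equal_get_amount_chars_together : Prop := ∀ (st : String), Dom_get_amount_chars_together st → Spec_get_amount_chars_together st (get_amount_chars_together st)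

-- ===== LEMMAS AND PROOFS =====

-- reference count on the boolean flag list, tracking "previous was a non-number char"
def auxB : Bool → List Bool → Int
  | _, [] => 0
  | prev, b :: bs => if b then (if prev then 0 else 1) + auxB true bs else auxB false bs

theorem foldA_eq (l : List Char) : ∀ (t : Int) (prev : Bool),
    (l.foldl stepA (t, prev)).1 = t + auxB prev (l.map (fun c => !is_number c)) := by
  induction l with
  | nil => intro t prev; simp [auxB]
  | cons c cs ih =>
    intro t prev
    rw [List.foldl_cons]
    by_cases h : is_number c = true
    · rw [show stepA (t, prev) c = (t, false) by simp [stepA, h]]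
      rw [ih]; simp [auxB, h]
    · simp only [Bool.not_eq_true] at h
      cases prev
      · rw [show stepA (t, false) c = (t + 1, true) by simp [stepA, h]]
        rw [ih]; simp [auxB, h]; ring
      · rw [show stepA (t, true) c = (t, true) by simp [stepA, h]]
        rw [ih]; simp [auxB, h]

theorem auxB_closed (fl : List Bool) : ∀ prev,
    auxB prev fl = cntT fl - adjT fl - (if prev && fl.headD false then 1 else 0) := by
  induction fl with
  | nil => intro prev; simp [auxB, cntT, adjT]
  | cons b bs ih =>
    intro prev
    have hadj : adjT (b :: bs) = (if b && bs.headD false then 1 else 0) + adjT bs := by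
      cases bs with
      | nil => simp [adjT]
      | cons b' bs' =>
        simp only [adjT, List.tail_cons, List.zip_cons_cons, List.countP_cons, List.headD_cons]
        push_cast
        by_cases h : (b && b') = true <;> simp [h] <;> ring
    have hcnt : cntT (b :: bs) = (if b then 1 else 0) + cntT bs := by
      simp only [cntT, List.countP_cons, id]
      by_cases h : b = true <;> simp [h] <;> push_cast <;> ring
    cases b with
    | false =>
      rw [show auxB prev (false :: bs) = auxB false bs from rfl]
      rw [ih false, hadj, hcnt]; simp
    | true =>
      rw [show auxB prev (true :: bs) = (if prev then 0 else 1) + auxB true bs from rfl]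
      rw [ih true, hadj, hcnt]
      cases h : bs.headD false <;> cases prev <;> simp [h] <;> ring

-- ===== VERDICT (by name: the statement is the Claim_ definition above) =====
theorem get_amount_chars_together_spec : Claim_equal_get_amount_chars_together := by
  intro st _
  show get_amount_chars_together st = get_amount_chars_together_alt st
  unfold get_amount_chars_together get_amount_chars_together_alt bFlags
  rw [show (0,false) = ((0:Int),false) from rfl]
  rw [foldA_eq, auxB_closed]
  simp
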